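-- pv_equiv track=rewrite | github.com/nik1-ie/mapmaker | v1/graphique.py | bords_sont_mer_ou_vides
-- ===== SOURCE A (Python) =====
-- def bords_sont_mer_ou_vides(plateau):
--     """
--     Vérifie si les bords du plateau sont constitués uniquement de cases vides (None) ou de la mer ("SSSS").
--     Retourne True si c'est le cas, False sinon.
--     """
--     lignes = len(plateau)
--     colonnes = len(plateau[0])
--     for i in range(lignes):
--         for j in range(colonnes):
--             if i == 0 or i == lignes-1 or j == 0 or j == colonnes-1:
--                 if plateau[i][j] not in (None, "SSSS"):
--                     return False
--     return True
-- ===== SOURCE B (Python) =====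
-- def bords_sont_mer_ou_vides(plateau):
--     # Visit only the border. The board width is defined by the first row.
--     sea = {None, "SSSS"}
--     c = len(plateau[0])
--     if c == 0:
--         return True
--     if not set(plateau[0]) <= sea:
--         return False
--     if len(plateau) > 1 and not set(plateau[-1][:c]) <= sea:
--         return False
--     for r in plateau[1:-1]:
--         if r[0] not in sea or r[c - 1] not in sea:
--             return False
--     return True
-- ===== Notes on version B (the rewrite author's own statement) =====
-- stated objective: alternative
-- what changed: Instead of scanning every cell of the grid and testing whether its index lies on the border, B visits only the border cells: the first row and the first len(plateau[0]) cells of the last row via a set-inclusion check, and columns 0 and len(plateau[0])-1 of each middle row.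
-- outside the precondition, e.g. on bords_sont_mer_ou_vides([[None, None], [None, 'XXXX'], [None]]): A returns False, B returns False
import Mathlib
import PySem

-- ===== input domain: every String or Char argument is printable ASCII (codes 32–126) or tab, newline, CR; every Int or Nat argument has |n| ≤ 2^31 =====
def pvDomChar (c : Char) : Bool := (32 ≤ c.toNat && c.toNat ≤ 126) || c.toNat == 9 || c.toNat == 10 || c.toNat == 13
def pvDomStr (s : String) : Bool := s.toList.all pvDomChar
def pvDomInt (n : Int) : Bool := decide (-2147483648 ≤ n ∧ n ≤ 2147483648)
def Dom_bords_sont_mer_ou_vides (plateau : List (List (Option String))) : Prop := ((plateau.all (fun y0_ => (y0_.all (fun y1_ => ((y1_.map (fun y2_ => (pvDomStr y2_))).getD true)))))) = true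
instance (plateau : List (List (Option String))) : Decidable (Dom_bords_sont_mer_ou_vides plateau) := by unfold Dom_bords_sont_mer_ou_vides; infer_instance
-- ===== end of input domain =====

-- B visits only the border cells (first row, last row, and the two border columns of each
-- middle row, the board width being len(plateau[0])) instead of scanning the whole grid.

-- ===== PORT A =====
def bords_sont_mer_ou_vides (plateau : List (List (Option String))) : Bool :=
  let lignes := plateau.length
  let colonnes := (plateau.getD 0 []).length
  (List.range lignes).all (fun i =>
    (List.range colonnes).all (fun j =>
      if i == 0 || i == lignes - 1 || j == 0 || j == colonnes - 1 then
        let cell := (plateau.getD i []).getD j none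
        cell == none || cell == some "SSSS"
      else true))

-- ===== PORT B =====
def bords_sont_mer_ou_vides_alt (plateau : List (List (Option String))) : Bool :=
  let sea : PySem.Set (Option String) := PySem.Set.ofList [none, some "SSSS"]
  let c := (plateau.getD 0 []).length
  if c == 0 then true
  else if !(PySem.Set.issubset (PySem.Set.ofList (plateau.getD 0 [])) sea) then false
  else if decide (1 < plateau.length) &&
      !(PySem.Set.issubset (PySem.Set.ofList
          (PySem.List.slice (PySem.List.pyGetD plateau (-1) []) none (some (c : Int)))) sea) then false
  else (PySem.List.slice plateau (some 1) (some (-1))).all (fun r =>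
    sea.contains (PySem.List.pyGetD r 0 none) && sea.contains (PySem.List.pyGetD r ((c : Int) - 1) none))

-- ===== PRECONDITION & SPEC =====
-- Pre_ excludes the empty board (A raises IndexError on plateau[0]) and ragged boards with a
-- row shorter than the first one — unless the first row already contains a non-sea cell, in
-- which case both programs stop there; on the excluded ragged boards A raises IndexError on
-- most inputs and otherwise returns False only by accident of its scan order.
def Pre_bords_sont_mer_ou_vides (plateau : List (List (Option String))) : Prop :=
  plateau ≠ [] ∧
    ((∃ v ∈ plateau.getD 0 [], ¬(v = none ∨ v = some "SSSS")) ∨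
     ∀ r ∈ plateau, (plateau.getD 0 []).length ≤ r.length)
instance (plateau : List (List (Option String))) : Decidable (Pre_bords_sont_mer_ou_vides plateau) := by unfold Pre_bords_sont_mer_ou_vides; infer_instance

def pvWitness_bords_sont_mer_ou_vides : List (List (Option String)) :=
  [[none, some "SSSS"], [some "SSSS", none]]

def Spec_bords_sont_mer_ou_vides (plateau : List (List (Option String))) (out : Bool) : Prop := out = bords_sont_mer_ou_vides_alt plateau
instance (plateau : List (List (Option String))) (out : Bool) : Decidable (Spec_bords_sont_mer_ou_vides plateau out) := by unfold Spec_bords_sont_mer_ou_vides; infer_instance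

-- ===== CLAIM (what is proved, stated in full; the proofs are below) =====
def Claim_equal_bords_sont_mer_ou_vides : Prop := ∀ (plateau : List (List (Option String))), Dom_bords_sont_mer_ou_vides plateau → Pre_bords_sont_mer_ou_vides plateau → Spec_bords_sont_mer_ou_vides plateau (bords_sont_mer_ou_vides plateau)

-- ===== LEMMAS AND PROOFS =====

theorem pv_getElem_congr {α : Type} {l l' : List α} {i i' : Nat} (hl : l = l') (hi : i = i')
    {h : i < l.length} : l[i]'h = l'[i']'(hl ▸ hi ▸ h) := by
  subst hl; subst hi; rfl

def pvOk (v : Option String) : Bool := v == none || v == some "SSSS"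

theorem pvOk_iff (v : Option String) : pvOk v = true ↔ (v = none ∨ v = some "SSSS") := by
  simp [pvOk]

theorem sea_contains (v : Option String) :
    (PySem.Set.ofList ([none, some "SSSS"] : List (Option String))).contains v = pvOk v := by
  rcases v with _ | s
  · rfl
  · show ((some s == none) || ((some s == some "SSSS") || false)) = ((some s == none) || (some s == some "SSSS"))
    simp

theorem sea_sub (row : List (Option String)) :
    PySem.Set.issubset (PySem.Set.ofList row) (PySem.Set.ofList ([none, some "SSSS"] : List (Option String))) = row.all pvOk := by
  show (PySem.Set.ofList row).all (fun x => (PySem.Set.ofList ([none, some "SSSS"] : List (Option String))).contains x) = row.all pvOk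
  simp only [sea_contains]
  rw [Bool.eq_iff_iff, List.all_eq_true, List.all_eq_true]
  constructor
  · intro h v hv; exact h v ((PySem.Set.mem_ofList row v).mpr hv)
  · intro h v hv; exact h v ((PySem.Set.mem_ofList row v).mp hv)

-- A = true iff every border cell is ok (index formulation).
theorem portA_iff (plateau : List (List (Option String))) :
    bords_sont_mer_ou_vides plateau = true ↔
      ∀ i < plateau.length, ∀ j < (plateau.getD 0 []).length,
        (i = 0 ∨ i = plateau.length - 1 ∨ j = 0 ∨ j = (plateau.getD 0 []).length - 1) →
        pvOk ((plateau.getD i []).getD j none) = true := by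
  simp only [bords_sont_mer_ou_vides, List.all_eq_true, List.mem_range]
  constructor
  · intro h i hi j hj hb
    have := h i hi j hj
    rw [if_pos] at this
    · exact this
    · simp only [Bool.or_eq_true, beq_iff_eq]; tauto
  · intro h i hi j hj
    by_cases hb : (i == 0 || i == plateau.length - 1 || j == 0 || j == (plateau.getD 0 []).length - 1) = true
    · rw [if_pos hb]
      simp only [Bool.or_eq_true, beq_iff_eq] at hb
      exact h i hi j hj (by tauto)
    · rw [if_neg hb]

theorem slice_middle (plateau : List (List (Option String))) (h : plateau ≠ []) :
    PySem.List.slice plateau (some 1) (some (-1)) = plateau.tail.dropLast := by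
  have h1 : (1 : Int) = ((1 : Nat) : Int) := rfl
  simp only [PySem.List.slice, PySem.List.clampIdx_neg_one]
  rw [h1, PySem.List.clampIdx_natCast]
  have hn : 1 ≤ plateau.length := List.length_pos_of_ne_nil h
  rw [min_eq_left (by exact_mod_cast hn)]
  rw [List.dropLast_eq_take, ← List.drop_one]
  congr 1
  simp

-- B = true iff the three border groups are ok (c ≠ 0 case).
theorem portB_iff (plateau : List (List (Option String))) (h : plateau ≠ [])
    (hc : (plateau.getD 0 []).length ≠ 0) :
    bords_sont_mer_ou_vides_alt plateau = true ↔
      ((plateau.getD 0 []).all pvOk = true ∧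
       ((plateau.getLast h).take (plateau.getD 0 []).length).all pvOk = true ∧
       ∀ r ∈ plateau.tail.dropLast,
         pvOk (r.getD 0 none) = true ∧
         pvOk (r.getD ((plateau.getD 0 []).length - 1) none) = true) := by
  have hcast : ((plateau.getD 0 []).length : Int) - 1 = (((plateau.getD 0 []).length - 1 : Nat) : Int) := by
    omega
  simp only [bords_sont_mer_ou_vides_alt, sea_sub, sea_contains,
    PySem.List.pyGetD_neg_one (h := h), slice_middle plateau h,
    PySem.List.slice_to_natCast, hcast, PySem.List.pyGetD_natCast, PySem.List.pyGetD_zero]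
  rw [if_neg (by simp only [beq_iff_eq]; exact hc)]
  by_cases hn1 : plateau.length = 1
  · obtain ⟨x, rfl⟩ := List.length_eq_one_iff.mp hn1
    have e : ([x] : List (List (Option String))).getD 0 [] = x := rfl
    simp only [e, List.getLast_singleton, List.tail_cons, List.dropLast_nil, List.take_length]
    simp [List.all_eq_true]
  · rw [show decide (1 < plateau.length) = true from by
      have := List.length_pos_of_ne_nil h; simp; omega]
    simp only [Bool.true_and]
    split_ifs with h1 h2
    · rw [Bool.not_eq_true'] at h1
      constructor
      · intro hf; exact absurd hf (by simp)
      · rintro ⟨ha, -, -⟩; rw [h1] at ha; exact absurd ha (by simp)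
    · rw [Bool.not_eq_true'] at h2
      constructor
      · intro hf; exact absurd hf (by simp)
      · rintro ⟨-, ha, -⟩; rw [h2] at ha; exact absurd ha (by simp)
    · have h1' : (plateau.getD 0 []).all pvOk = true := by
        revert h1; cases (plateau.getD 0 []).all pvOk <;> simp
      have h2' : ((plateau.getLast h).take (plateau.getD 0 []).length).all pvOk = true := by
        revert h2; cases ((plateau.getLast h).take (plateau.getD 0 []).length).all pvOk <;> simp
      simp only [h1', h2', true_and, List.all_eq_true, Bool.and_eq_true]

theorem getElem_tail_dropLast (plateau : List (List (Option String))) (k : Nat)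
    (hk : k < plateau.tail.dropLast.length) :
    plateau.tail.dropLast[k] = plateau[k + 1]'(by simp [List.length_dropLast, List.length_tail] at hk; omega) := by
  rw [List.getElem_dropLast, List.getElem_tail]

-- If the first row has a non-sea cell, both programs return False.
theorem both_false_of_bad_first (plateau : List (List (Option String))) (hne : plateau ≠ [])
    (hbad : ∃ v ∈ plateau.getD 0 [], ¬(v = none ∨ v = some "SSSS")) :
    bords_sont_mer_ou_vides plateau = false ∧ bords_sont_mer_ou_vides_alt plateau = false := by
  obtain ⟨v, hv, hvbad⟩ := hbad
  have hall : (plateau.getD 0 []).all pvOk = false := by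
    rw [Bool.eq_false_iff]
    intro h
    rw [List.all_eq_true] at h
    exact hvbad ((pvOk_iff v).mp (h v hv))
  have hn : 0 < plateau.length := List.length_pos_of_ne_nil hne
  constructor
  · rw [Bool.eq_false_iff]
    intro hA
    rw [portA_iff] at hA
    obtain ⟨j, hj, hvj⟩ := List.mem_iff_getElem.mp hv
    have := hA 0 hn j hj (Or.inl rfl)
    rw [List.getD_eq_getElem _ _ hj, hvj] at this
    exact hvbad ((pvOk_iff v).mp this)
  · have hc : (plateau.getD 0 []).length ≠ 0 := by
      intro h0
      rw [List.length_eq_zero_iff] at h0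
      rw [h0] at hv
      cases hv
    simp only [bords_sont_mer_ou_vides_alt, sea_sub]
    rw [if_neg (by simp only [beq_iff_eq]; exact hc), if_pos (by rw [hall]; rfl)]

-- ===== VERDICT (by name: the statement is the Claim_ definition above) =====
theorem bords_sont_mer_ou_vides_spec : Claim_equal_bords_sont_mer_ou_vides := by
  intro plateau _ hpre
  obtain ⟨hne, hpre⟩ := hpre
  unfold Spec_bords_sont_mer_ou_vides
  rcases hpre with hbad | hwide
  · obtain ⟨hA, hB⟩ := both_false_of_bad_first plateau hne hbad
    rw [hA, hB]
  have hn : 0 < plateau.length := List.length_pos_of_ne_nil hne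
  set n := plateau.length with hn_def
  set c := (plateau.getD 0 []).length with hc_def
  have hlen : ∀ i (hi : i < n), c ≤ plateau[i].length := by
    intro i hi; exact hwide _ (List.getElem_mem hi)
  have hgetD : ∀ i (hi : i < n), plateau.getD i [] = plateau[i] := by
    intro i hi; exact List.getD_eq_getElem plateau [] hi
  have hmidlen : plateau.tail.dropLast.length = n - 2 := by
    simp only [List.length_dropLast, List.length_tail]; omega
  by_cases hc0 : c = 0
  · -- no columns: no border cell is ever inspected, both return True
    have hA : bords_sont_mer_ou_vides plateau = true := by
      rw [portA_iff]
      intro i hi j hj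
      exact absurd hj (by omega)
    have hB : bords_sont_mer_ou_vides_alt plateau = true := by
      simp only [bords_sont_mer_ou_vides_alt]
      rw [if_pos (by simp only [beq_iff_eq, ← hc_def]; exact hc0)]
    rw [hA, hB]
  rw [Bool.eq_iff_iff, portA_iff, portB_iff plateau hne hc0]
  have hlast : plateau.getLast hne = plateau[n - 1]'(by omega) := by
    rw [List.getLast_eq_getElem]
  constructor
  · intro H
    refine ⟨?_, ?_, ?_⟩
    · -- first row
      rw [List.all_eq_true]
      intro v hv
      obtain ⟨j, hj, hvj⟩ := List.mem_iff_getElem.mp hv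
      have hH := H 0 hn j hj (Or.inl rfl)
      rw [List.getD_eq_getElem _ _ hj, hvj] at hH
      exact hH
    · -- last row, first c cells
      rw [List.all_eq_true]
      intro v hv
      obtain ⟨j, hj, hvj⟩ := List.mem_iff_getElem.mp hv
      have hjc : j < c := by rw [List.length_take] at hj; omega
      have hjn : n - 1 < n := by omega
      have hjl : j < (plateau[n-1]'(by omega)).length := by
        have := hlen (n-1) hjn; omega
      have hH := H (n-1) hjn j hjc (Or.inr (Or.inl rfl))
      rw [hgetD (n-1) hjn, List.getD_eq_getElem _ _ hjl] at hH
      rw [← hvj, List.getElem_take, pv_getElem_congr hlast rfl]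
      exact hH
    · -- middle rows
      intro r hr
      obtain ⟨k, hk, hrk⟩ := List.mem_iff_getElem.mp hr
      have hk' : k + 1 < n := by rw [hmidlen] at hk; omega
      have hrowe : r = plateau[k+1] := by rw [← hrk, getElem_tail_dropLast]
      have hrlen : c ≤ r.length := by rw [hrowe]; exact hlen _ hk'
      constructor
      · have hH := H (k+1) hk' 0 (by omega) (Or.inr (Or.inr (Or.inl rfl)))
        rw [hgetD _ hk', List.getD_eq_getElem _ _ (by have := hlen _ hk'; omega)] at hH
        rw [List.getD_eq_getElem _ _ (by omega), pv_getElem_congr hrowe rfl]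
        exact hH
      · have hH := H (k+1) hk' (c-1) (by omega) (Or.inr (Or.inr (Or.inr rfl)))
        rw [hgetD _ hk', List.getD_eq_getElem _ _ (by have := hlen _ hk'; omega)] at hH
        rw [List.getD_eq_getElem _ _ (by omega), pv_getElem_congr hrowe rfl]
        exact hH
  · rintro ⟨H0, Hl, Hm⟩ i hi j hj hb
    by_cases h0 : i = 0
    · subst h0
      rw [List.getD_eq_getElem _ _ hj]
      rw [List.all_eq_true] at H0
      exact H0 _ (List.getElem_mem hj)
    rw [hgetD i hi, List.getD_eq_getElem _ _ (by have := hlen i hi; omega)]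
    by_cases hl : i = n - 1
    · have eRow : plateau[n-1]'(by omega) = plateau[i]'hi := pv_getElem_congr rfl (by omega)
      rw [List.all_eq_true] at Hl
      apply Hl
      rw [List.mem_iff_getElem]
      refine ⟨j, ?_, ?_⟩
      · rw [List.length_take]
        have h1 : (plateau.getLast hne).length = plateau[i].length := by
          rw [hlast.trans eRow]
        have := hlen i hi
        omega
      · rw [List.getElem_take]
        exact pv_getElem_congr (hlast.trans eRow) rfl
    · have hmem : plateau[i]'hi ∈ plateau.tail.dropLast := by
        rw [List.mem_iff_getElem]
        refine ⟨i - 1, by rw [hmidlen]; omega, ?_⟩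
        rw [getElem_tail_dropLast]
        exact pv_getElem_congr rfl (by omega)
      obtain ⟨m0, m1⟩ := Hm _ hmem
      rcases hb with hb | hb | hb | hb
      · omega
      · omega
      · subst hb
        rw [List.getD_eq_getElem _ _ (by have := hlen i hi; omega)] at m0
        exact m0
      · subst hb
        rw [List.getD_eq_getElem _ _ (by have := hlen i hi; omega)] at m1
        exact m1
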